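-- pv_equiv track=rewrite | github.com/MenNianShi/leetcode-python | 二分查找/1300. 转变数组后最接近目标值的数组和.py | findBestValue
-- ===== SOURCE A (Python) =====
-- import bisect
--
-- def findBestValue(arr, target):
--     """
--     :type arr: List[int]
--     :type target: int
--     :rtype: int
--     """
--     n = len(arr)
--     prefix = [0]
--     for num in arr:
--         prefix.append(prefix[-1] + num)
--
--     r, ans, diff = max(arr), 0, target
--     for i in range(1, r + 1):
--         it = bisect.bisect_left(arr, i)
--         cur = prefix[it] + (n - it) * i
--         if abs(cur - target) < diff:
--             ans, diff = i, abs(cur - target)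
--     return ans
-- ===== SOURCE B (Python) =====
-- import bisect
--
-- def findBestValue(arr, target):
--     n = len(arr)
--     prefix = [0]
--     for num in arr:
--         prefix.append(prefix[-1] + num)
--     r = max(arr)
--     if r < 1:
--         return 0
--     # candidate values 1..r split into maximal intervals on which
--     # bisect_left(arr, i) is constant: it can only change at i = v + 1, v in arr
--     starts = sorted({1} | {v + 1 for v in arr if 1 <= v + 1 <= r})
--     ends = [s - 1 for s in starts[1:]] + [r]
--     ans, diff = 0, target
--     for l, rr in zip(starts, ends):
--         t = bisect.bisect_left(arr, l)
--         s = n - t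
--         c = prefix[t] - target
--         # first minimizer of g(i) = |s*i + c| on [l, rr]; g is linear-decreasing
--         # up to q = (-c)//s then increasing, so the answer is a clamp of q
--         if s == 0:
--             i = l
--         else:
--             q = (-c) // s
--             if rr <= q:
--                 i = rr
--             elif q < l:
--                 i = l
--             elif q + 1 > rr or abs(s * q + c) <= abs(s * (q + 1) + c):
--                 i = q
--             else:
--                 i = q + 1
--         g = abs(s * i + c)
--         if g < diff:
--             ans, diff = i, g
--     return ans
-- ===== Notes on version B (the rewrite author's own statement) =====
-- stated objective: faster
-- what changed: A evaluates the clamped sum for every candidate value i = 1..max(arr) (a bisect per candidate); B partitions the candidate range into the at most n+1 maximal intervals on which bisect_left(arr, i) is constant (breakpoints v+1 for v in arr) and takes the first minimizer of the linear distance on each interval in closed form.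
import Mathlib
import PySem

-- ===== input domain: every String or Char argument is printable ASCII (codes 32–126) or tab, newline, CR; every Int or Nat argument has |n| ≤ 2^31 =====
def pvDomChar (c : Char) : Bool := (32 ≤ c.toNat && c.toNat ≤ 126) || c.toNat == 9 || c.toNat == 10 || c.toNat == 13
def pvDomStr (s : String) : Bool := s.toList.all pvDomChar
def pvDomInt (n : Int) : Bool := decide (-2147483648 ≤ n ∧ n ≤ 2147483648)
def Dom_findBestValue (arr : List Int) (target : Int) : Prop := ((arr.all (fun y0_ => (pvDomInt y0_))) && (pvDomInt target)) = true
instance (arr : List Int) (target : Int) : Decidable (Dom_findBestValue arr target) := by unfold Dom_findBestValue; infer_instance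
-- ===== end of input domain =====

-- B replaces A's scan over every candidate value 1..max(arr) by a scan over the ≤ n+1
-- maximal intervals on which bisect_left(arr, i) is constant, taking the first minimizer
-- of the linear distance on each interval in closed form (objective: faster).

-- ===== PORT A =====
def findBestValue (arr : List Int) (target : Int) : Int :=
  let n := arr.length
  let prefixSums := arr.foldl (fun p num => p ++ [p.getLastD 0 + num]) [0]
  match PySem.List.max? arr (fun x => x) with
  | none => 0   -- Python: max(arr) raises ValueError on an empty list (excluded by Pre_)
  | some r =>
    (((PySem.List.pyRange 1 (r + 1) 1).foldl (fun (st : Int × Int) i =>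
        let it := PySem.List.bisectLeft arr i
        let cur := prefixSums.getD it 0 + ((n : Int) - (it : Int)) * i
        if |cur - target| < st.2 then (i, |cur - target|) else st)
      (0, target))).1

-- ===== PORT B =====
def findBestValue_alt (arr : List Int) (target : Int) : Int :=
  let n := arr.length
  let prefixSums := arr.foldl (fun p num => p ++ [p.getLastD 0 + num]) [0]
  match PySem.List.max? arr (fun x => x) with
  | none => 0   -- Python: max(arr) raises ValueError on an empty list (excluded by Pre_)
  | some r =>
    if r < 1 then 0 else
    let starts := PySem.List.sorted
      (PySem.Set.ofList (1 :: (arr.filter (fun v => 1 ≤ v + 1 && v + 1 ≤ r)).map (fun v => v + 1)))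
      (fun x => x) false
    let ends := starts.tail.map (fun s => s - 1) ++ [r]
    (((starts.zip ends).foldl (fun (st : Int × Int) lr =>
        let t := PySem.List.bisectLeft arr lr.1
        let s := (n : Int) - (t : Int)
        let c := prefixSums.getD t 0 - target
        let i := if s = 0 then lr.1
          else
            let q := PySem.Int.floordiv (-c) s
            if lr.2 ≤ q then lr.2
            else if q < lr.1 then lr.1
            else if |s * q + c| ≤ |s * (q + 1) + c| then q else q + 1
        let g := |s * i + c|
        if g < st.2 then (i, g) else st)
      (0, target))).1

-- ===== PRECONDITION & SPEC =====
-- Pre_ excludes only the empty list, on which Python's max(arr) raises ValueError.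
def Pre_findBestValue (arr : List Int) (target : Int) : Prop := arr ≠ []
instance (arr : List Int) (target : Int) : Decidable (Pre_findBestValue arr target) := by unfold Pre_findBestValue; infer_instance
def pvWitness_findBestValue : List Int × Int := ([2, 9, 5], 10)

def Spec_findBestValue (arr : List Int) (target : Int) (out : Int) : Prop := out = findBestValue_alt arr target
instance (arr : List Int) (target : Int) (out : Int) : Decidable (Spec_findBestValue arr target out) := by unfold Spec_findBestValue; infer_instance

-- ===== CLAIM (what is proved, stated in full; the proofs are below) =====
def Claim_equal_findBestValue : Prop := ∀ (arr : List Int) (target : Int), Dom_findBestValue arr target → Pre_findBestValue arr target → Spec_findBestValue arr target (findBestValue arr target)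

-- ===== LEMMAS AND PROOFS =====

theorem bLoop_le (xs : List Int) (x : Int) (fuel lo hi : Nat) (h : lo ≤ hi) :
    PySem.List.bisectLeftLoop xs x fuel lo hi ≤ hi := by
  induction fuel generalizing lo hi with
  | zero => simpa [PySem.List.bisectLeftLoop]
  | succ fuel ih =>
    rw [PySem.List.bisectLeftLoop]
    by_cases hlh : lo < hi
    · simp only [if_pos hlh]
      cases hget : xs[(lo + hi) / 2]? with
      | none => exact h
      | some y =>
        by_cases hy : y < x
        · simpa [hy] using ih ((lo + hi) / 2 + 1) hi (by omega)
        · exact le_trans (by simpa [hy] using ih lo ((lo + hi) / 2) (by omega)) (by omega)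
    · simpa [hlh]

theorem bisectLeft_le_length (xs : List Int) (x : Int) :
    PySem.List.bisectLeft xs x ≤ xs.length := by
  exact bLoop_le xs x xs.length 0 xs.length (Nat.zero_le _)

theorem bLoop_congr (xs : List Int) (x y : Int) (h : ∀ a ∈ xs, a < x ↔ a < y)
    (fuel lo hi : Nat) :
    PySem.List.bisectLeftLoop xs x fuel lo hi = PySem.List.bisectLeftLoop xs y fuel lo hi := by
  induction fuel generalizing lo hi with
  | zero => simp [PySem.List.bisectLeftLoop]
  | succ fuel ih =>
    rw [PySem.List.bisectLeftLoop, PySem.List.bisectLeftLoop]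
    by_cases hlh : lo < hi
    · simp only [if_pos hlh]
      cases hget : xs[(lo + hi) / 2]? with
      | none => rfl
      | some a =>
        have hmem : a ∈ xs := List.mem_of_getElem? hget
        have hiff := h a hmem
        change (if a < x then PySem.List.bisectLeftLoop xs x fuel ((lo+hi)/2+1) hi
            else PySem.List.bisectLeftLoop xs x fuel lo ((lo+hi)/2))
          = (if a < y then PySem.List.bisectLeftLoop xs y fuel ((lo+hi)/2+1) hi
            else PySem.List.bisectLeftLoop xs y fuel lo ((lo+hi)/2))
        by_cases ha : a < x
        · rw [if_pos ha, if_pos (hiff.mp ha), ih]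
        · rw [if_neg ha, if_neg (fun hy => ha (hiff.mpr hy)), ih]
    · simp [hlh]

theorem bisectLeft_congr (xs : List Int) (x y : Int) (h : ∀ a ∈ xs, a < x ↔ a < y) :
    PySem.List.bisectLeft xs x = PySem.List.bisectLeft xs y := by
  exact bLoop_congr xs x y h xs.length 0 xs.length

-- proof-side views of the two loop bodies
def pvPrefix (arr : List Int) : List Int := arr.foldl (fun p num => p ++ [p.getLastD 0 + num]) [0]

def pvG (arr : List Int) (target i : Int) : Int :=
  |(pvPrefix arr).getD (PySem.List.bisectLeft arr i) 0
    + ((arr.length : Int) - (PySem.List.bisectLeft arr i : Int)) * i - target|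

def pvStep (gf : Int → Int) (st : Int × Int) (i : Int) : Int × Int :=
  if gf i < st.2 then (i, gf i) else st

def pvChooseCore (s c l rr : Int) : Int :=
  if s = 0 then l
  else if rr ≤ PySem.Int.floordiv (-c) s then rr
  else if PySem.Int.floordiv (-c) s < l then l
  else if |s * PySem.Int.floordiv (-c) s + c| ≤ |s * (PySem.Int.floordiv (-c) s + 1) + c|
    then PySem.Int.floordiv (-c) s else PySem.Int.floordiv (-c) s + 1

def pvS (arr : List Int) (l : Int) : Int := (arr.length : Int) - (PySem.List.bisectLeft arr l : Int)
def pvC (arr : List Int) (target l : Int) : Int := (pvPrefix arr).getD (PySem.List.bisectLeft arr l) 0 - target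

def pvStepB (arr : List Int) (target : Int) (st : Int × Int) (lr : Int × Int) : Int × Int :=
  pvStep (fun i => |pvS arr lr.1 * i + pvC arr target lr.1|) st
    (pvChooseCore (pvS arr lr.1) (pvC arr target lr.1) lr.1 lr.2)

theorem foldl_no_update (gf : Int → Int) (L : List Int) (st : Int × Int)
    (h : ∀ i ∈ L, st.2 ≤ gf i) : L.foldl (pvStep gf) st = st := by
  induction L with
  | nil => rfl
  | cons a L ih =>
    have ha : pvStep gf st a = st := by
      unfold pvStep; rw [if_neg (not_lt.mpr (h a (List.mem_cons_self ..)))]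
    rw [List.foldl_cons, ha, ih (fun i hi => h i (List.mem_cons_of_mem _ hi))]

theorem foldl_first_min (gf : Int → Int) (L1 L2 : List Int) (m : Int) (st : Int × Int)
    (h1 : ∀ i ∈ L1, gf m < gf i) (h2 : ∀ i ∈ L2, gf m ≤ gf i) :
    (L1 ++ m :: L2).foldl (pvStep gf) st = if gf m < st.2 then (m, gf m) else st := by
  induction L1 generalizing st with
  | nil =>
    simp only [List.nil_append, List.foldl_cons]
    by_cases hm : gf m < st.2
    · rw [if_pos hm]
      have hs : pvStep gf st m = (m, gf m) := by unfold pvStep; rw [if_pos hm]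
      rw [hs, foldl_no_update gf L2 (m, gf m) h2]
    · rw [if_neg hm]
      have hs : pvStep gf st m = st := by unfold pvStep; rw [if_neg hm]
      rw [hs, foldl_no_update gf L2 st (fun i hi => le_trans (not_lt.mp hm) (h2 i hi))]
  | cons a L1 ih =>
    rw [List.cons_append, List.foldl_cons]
    have hma := h1 a (List.mem_cons_self ..)
    by_cases hcond : gf a < st.2
    · have hs : pvStep gf st a = (a, gf a) := by unfold pvStep; rw [if_pos hcond]
      rw [hs, ih _ (fun i hi => h1 i (List.mem_cons_of_mem _ hi))]
      simp only
      rw [if_pos hma, if_pos (lt_trans hma hcond)]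
    · have hs : pvStep gf st a = st := by unfold pvStep; rw [if_neg hcond]
      rw [hs, ih st (fun i hi => h1 i (List.mem_cons_of_mem _ hi))]

theorem pvChoose_spec (s c l rr : Int) (hs : 0 ≤ s) (hlr : l ≤ rr) :
    (l ≤ pvChooseCore s c l rr ∧ pvChooseCore s c l rr ≤ rr)
    ∧ (∀ i, l ≤ i → i < pvChooseCore s c l rr →
        |s * pvChooseCore s c l rr + c| < |s * i + c|)
    ∧ (∀ i, pvChooseCore s c l rr < i → i ≤ rr →
        |s * pvChooseCore s c l rr + c| ≤ |s * i + c|) := by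
  by_cases hs0 : s = 0
  · subst hs0
    simp only [pvChooseCore, if_pos rfl]
    refine ⟨⟨le_refl l, hlr⟩, fun i hi1 hi2 => absurd (lt_of_le_of_lt hi1 hi2) (lt_irrefl l),
      fun i _ _ => by simp⟩
  · have hpos : 0 < s := lt_of_le_of_ne hs (Ne.symm hs0)
    set q := PySem.Int.floordiv (-c) s with hqdef
    have hbr : q * s ≤ -c ∧ -c < (q + 1) * s :=
      (PySem.Int.floordiv_eq_iff_of_pos hpos).mp hqdef.symm
    have hinc : ∀ i j : Int, q + 1 ≤ i → i < j → |s * i + c| < |s * j + c| := by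
      intro i j hqi hij
      have hi0 : 0 < s * i + c := by nlinarith [hbr.2]
      have hj0 : 0 < s * j + c := by nlinarith [hbr.2]
      rw [abs_of_pos hi0, abs_of_pos hj0]
      nlinarith
    have hdec : ∀ i j : Int, i < j → j ≤ q → |s * j + c| < |s * i + c| := by
      intro i j hij hjq
      have hj0 : s * j + c ≤ 0 := by nlinarith [hbr.1]
      have hi0 : s * i + c < 0 := by nlinarith [hbr.1]
      rw [abs_of_nonpos hj0, abs_of_neg hi0]
      nlinarith
    unfold pvChooseCore
    rw [if_neg hs0, ← hqdef]
    by_cases h1 : rr ≤ q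
    · rw [if_pos h1]
      exact ⟨⟨hlr, le_refl rr⟩, fun i hi1 hi2 => hdec i rr hi2 h1,
        fun i hi1 hi2 => absurd hi2 (not_le.mpr hi1)⟩
    · rw [if_neg h1]
      by_cases h2 : q < l
      · rw [if_pos h2]
        exact ⟨⟨le_refl l, hlr⟩,
          fun i hi1 hi2 => absurd (lt_of_le_of_lt hi1 hi2) (lt_irrefl l),
          fun i hi1 hi2 => le_of_lt (hinc l i (by omega) hi1)⟩
      · rw [if_neg h2]
        by_cases h3 : |s * q + c| ≤ |s * (q + 1) + c|
        · rw [if_pos h3]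
          refine ⟨⟨by omega, by omega⟩, fun i hi1 hi2 => hdec i q hi2 (le_refl q), ?_⟩
          intro i hi1 hi2
          rcases eq_or_lt_of_le (by omega : q + 1 ≤ i) with he | hl2
          · rw [← he]; exact h3
          · exact le_trans h3 (le_of_lt (hinc (q + 1) i (le_refl _) hl2))
        · rw [if_neg h3]
          push_neg at h3
          refine ⟨⟨by omega, by omega⟩, ?_,
            fun i hi1 hi2 => le_of_lt (hinc (q + 1) i (le_refl _) hi1)⟩
          intro i hi1 hi2
          rcases eq_or_lt_of_le (by omega : i ≤ q) with he | hl2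
          · rw [he]; exact h3
          · exact lt_trans h3 (hdec i q hl2 (le_refl q))

theorem piece_fold (arr : List Int) (target l rr : Int) (st : Int × Int) (hlr : l ≤ rr)
    (hnb : ∀ v ∈ arr, ¬ (l ≤ v ∧ v + 1 ≤ rr)) :
    (PySem.List.pyRange l (rr + 1) 1).foldl (pvStep (pvG arr target)) st
      = pvStepB arr target st (l, rr) := by
  have hc : ∀ i : Int, l ≤ i → i ≤ rr →
      PySem.List.bisectLeft arr i = PySem.List.bisectLeft arr l := by
    intro i h1 h2
    refine bisectLeft_congr arr i l (fun a ha => ⟨fun h => ?_, fun h => lt_of_lt_of_le h h1⟩)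
    by_contra hh
    push_neg at hh
    exact hnb a ha ⟨hh, by omega⟩
  have hg : ∀ i : Int, l ≤ i → i ≤ rr →
      pvG arr target i = |pvS arr l * i + pvC arr target l| := by
    intro i h1 h2
    unfold pvG pvS pvC
    rw [hc i h1 h2]
    congr 1
    ring
  have hs : 0 ≤ pvS arr l := by
    have := bisectLeft_le_length arr l
    unfold pvS
    omega
  obtain ⟨⟨hb1, hb2⟩, hbef, haft⟩ := pvChoose_spec (pvS arr l) (pvC arr target l) l rr hs hlr
  set m := pvChooseCore (pvS arr l) (pvC arr target l) l rr with hm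
  rw [PySem.List.pyRange_one_append l m (rr + 1) hb1 (by omega),
    PySem.List.pyRange_one_cons (show m < rr + 1 by omega)]
  have h1 : ∀ i ∈ PySem.List.pyRange l m 1, pvG arr target m < pvG arr target i := by
    intro i hi
    rw [PySem.List.mem_pyRange_one] at hi
    rw [hg i hi.1 (by omega), hg m hb1 hb2]
    exact hbef i hi.1 hi.2
  have h2 : ∀ i ∈ PySem.List.pyRange (m + 1) (rr + 1) 1, pvG arr target m ≤ pvG arr target i := by
    intro i hi
    rw [PySem.List.mem_pyRange_one] at hi
    rw [hg i (by omega) (by omega), hg m hb1 hb2]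
    exact haft i (by omega) (by omega)
  rw [foldl_first_min (pvG arr target) _ _ m st h1 h2]
  unfold pvStepB pvStep
  rw [hg m hb1 hb2]

theorem pieces_fold (arr : List Int) (target r : Int) (l : Int) (rest : List Int)
    (st : Int × Int)
    (hchain : (l :: rest).Pairwise (· < ·))
    (hle : ∀ x ∈ l :: rest, x ≤ r)
    (hcomp : ∀ v ∈ arr, l < v + 1 → v + 1 ≤ r → v + 1 ∈ l :: rest)
    (hlr : l ≤ r) :
    (PySem.List.pyRange l (r + 1) 1).foldl (pvStep (pvG arr target)) st
      = ((l :: rest).zip (rest.map (fun s => s - 1) ++ [r])).foldl (pvStepB arr target) st := by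
  induction rest generalizing l st with
  | nil =>
    simp only [List.map_nil, List.nil_append, List.zip_cons_cons, List.zip_nil_right,
      List.foldl_cons, List.foldl_nil]
    refine piece_fold arr target l r st hlr ?_
    intro v hv ⟨hv1, hv2⟩
    have := hcomp v hv (by omega) hv2
    simp only [List.mem_singleton] at this
    omega
  | cons l2 rest ih =>
    have hl2 : l < l2 := (List.pairwise_cons.mp hchain).1 l2 (List.mem_cons_self ..)
    have hl2r : l2 ≤ r := hle l2 (List.mem_cons_of_mem _ (List.mem_cons_self ..))
    have htail : ∀ x ∈ l2 :: rest, l2 ≤ x := by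
      intro x hx
      rcases List.mem_cons.mp hx with he | ht
      · omega
      · exact le_of_lt ((List.pairwise_cons.mp (List.pairwise_cons.mp hchain).2).1 x ht)
    rw [PySem.List.pyRange_one_append l l2 (r + 1) (le_of_lt hl2) (by omega),
      List.foldl_append]
    have hrange : PySem.List.pyRange l l2 1 = PySem.List.pyRange l ((l2 - 1) + 1) 1 := by
      congr 1
      ring
    have hnb : ∀ v ∈ arr, ¬ (l ≤ v ∧ v + 1 ≤ l2 - 1) := by
      intro v hv ⟨hv1, hv2⟩
      have hmem := hcomp v hv (by omega) (by omega)
      rcases List.mem_cons.mp hmem with he | ht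
      · omega
      · have := htail _ ht
        omega
    rw [hrange, piece_fold arr target l (l2 - 1) st (by omega) hnb]
    simp only [List.map_cons, List.cons_append, List.zip_cons_cons, List.foldl_cons]
    refine ih l2 (pvStepB arr target st (l, l2 - 1)) (List.pairwise_cons.mp hchain).2
      (fun x hx => hle x (List.mem_cons_of_mem _ hx)) ?_ hl2r
    intro v hv hv1 hv2
    have hmem := hcomp v hv (by omega) hv2
    rcases List.mem_cons.mp hmem with he | ht
    · omega
    · exact ht

-- ===== VERDICT (by name: the statement is the Claim_ definition above) =====
theorem findBestValue_spec : Claim_equal_findBestValue := by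
  unfold Claim_equal_findBestValue Spec_findBestValue
  intro arr target hdom hpre
  unfold Pre_findBestValue at hpre
  cases hmax : PySem.List.max? arr (fun x => x) with
  | none => exact absurd ((PySem.List.max?_eq_none_iff arr (fun x => x)).mp hmax) hpre
  | some r =>
    have hA : findBestValue arr target
        = ((PySem.List.pyRange 1 (r + 1) 1).foldl (pvStep (pvG arr target)) (0, target)).1 := by
      simp only [findBestValue, hmax]
      rfl
    by_cases hr : r < 1
    · have hB : findBestValue_alt arr target = 0 := by
        simp only [findBestValue_alt, hmax, if_pos hr]
      rw [hA, hB, PySem.List.pyRange_one_eq_nil (by omega)]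
      rfl
    · push_neg at hr
      have hB : findBestValue_alt arr target
          = (((PySem.List.sorted (PySem.Set.ofList
                ((1 : Int) :: (arr.filter (fun v => 1 ≤ v + 1 && v + 1 ≤ r)).map (fun v => v + 1)))
                (fun x => x) false).zip
              ((PySem.List.sorted (PySem.Set.ofList
                ((1 : Int) :: (arr.filter (fun v => 1 ≤ v + 1 && v + 1 ≤ r)).map (fun v => v + 1)))
                (fun x => x) false).tail.map (fun s => s - 1) ++ [r])).foldl
              (pvStepB arr target) (0, target)).1 := by
        simp only [findBestValue_alt, hmax, if_neg (not_lt.mpr hr)]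
        rfl
      rw [hA, hB]
      set bps := (arr.filter (fun v => 1 ≤ v + 1 && v + 1 ≤ r)).map (fun v => v + 1) with hbps
      set starts := PySem.List.sorted (PySem.Set.ofList ((1 : Int) :: bps)) (fun x => x) false
        with hstarts
      have hpw : starts.Pairwise (· < ·) := PySem.List.sorted_ofList_pairwise_lt ..
      have hmem : ∀ x : Int, x ∈ starts ↔ x = 1 ∨ x ∈ bps := by
        intro x
        rw [hstarts, PySem.List.mem_sorted, PySem.Set.mem_ofList, List.mem_cons]
      have hone : (1 : Int) ∈ starts := (hmem 1).mpr (Or.inl rfl)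
      have hbnd : ∀ x ∈ starts, 1 ≤ x ∧ x ≤ r := by
        intro x hx
        rcases (hmem x).mp hx with he | hb
        · omega
        · rw [hbps] at hb
          obtain ⟨v, hv, rfl⟩ := List.mem_map.mp hb
          have hf := List.of_mem_filter hv
          simp only [Bool.and_eq_true, decide_eq_true_eq] at hf
          exact hf
      obtain ⟨h0, t, hst⟩ : ∃ h0 t, starts = h0 :: t := by
        cases hs : starts with
        | nil => rw [hs] at hone; cases hone
        | cons a b => exact ⟨a, b, rfl⟩
      have hh0 : h0 = 1 := by
        rcases List.mem_cons.mp (hst ▸ hone) with he | ht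
        · omega
        · have h1 := (hbnd h0 (hst ▸ List.mem_cons_self ..)).1
          have h2 := (List.pairwise_cons.mp (hst ▸ hpw)).1 1 ht
          omega
      have hpw1 : ((1 : Int) :: t).Pairwise (· < ·) := by
        rw [← hh0, ← hst]; exact hpw
      rw [hst, hh0]
      simp only [List.tail_cons]
      refine congrArg Prod.fst (pieces_fold arr target r 1 t (0, target) hpw1 ?_ ?_ hr)
      · intro x hx
        refine (hbnd x ?_).2
        rw [hst, hh0]
        exact hx
      · intro v hv hv1 hv2
        have hmm : v + 1 ∈ starts := (hmem (v + 1)).mpr (Or.inr (by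
          rw [hbps]
          refine List.mem_map.mpr ⟨v, List.mem_filter.mpr ⟨hv, ?_⟩, rfl⟩
          simp only [Bool.and_eq_true, decide_eq_true_eq]
          omega))
        rw [hst, hh0] at hmm
        exact hmm
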